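-- pv_equiv track=rewrite | github.com/maxipdev/Introduccion-a-la-programacion-1-UBA | python/clases de repaso/clase_repaso.py | stock_productos
-- ===== SOURCE A (Python) =====
-- def stock_productos(lista: list[tuple[str, int]]) -> dict[str, tuple[int, int]]:
--     res: dict[str, tuple[int, int]] = {}
--     for nombre, valor in lista:
--         # verico que ese producto no haya sido añadido al diccionario antes, pq en caso de que haberlo hecho, no es necesario volverlo a mirar:
--         if nombre in res:
--             continue # se saltea este valor y va hacia el que sigue
--         # en caso de que no este se agrega
--         maximo: int = valor # los pongo por defecto
--         minimo: int = valor # los pongo por defecto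
--         for name, value in lista:
--             if nombre == name:
--                 # miro el más grande
--                 if value > maximo:
--                     maximo = value
--                 #miro el más chico
--                 if value < minimo:
--                     minimo = value
--         # una vez que recorrio todo la lista comparando con ese valor,  lo agrega al diccionario
--         res[nombre] = (minimo, maximo)
--     return res
-- ===== SOURCE B (Python) =====
-- def stock_productos(lista: list[tuple[str, int]]) -> dict[str, tuple[int, int]]:
--     # pass 1: group all observed values by product name, in first-occurrence order
--     groups: dict[str, list[int]] = {}
--     for nombre, valor in lista:
--         groups[nombre] = groups.get(nombre, []) + [valor]
--     # pass 2: reduce each group to its (min, max)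
--     return {nombre: (min(vals), max(vals)) for nombre, vals in groups.items()}
-- ===== Notes on version B (the rewrite author's own statement) =====
-- stated objective: faster
-- what changed: A rescans the whole list for every new name (nested loops); B makes one grouping pass building name -> list of values and a second pass reducing each group to (min, max).
import Mathlib
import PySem

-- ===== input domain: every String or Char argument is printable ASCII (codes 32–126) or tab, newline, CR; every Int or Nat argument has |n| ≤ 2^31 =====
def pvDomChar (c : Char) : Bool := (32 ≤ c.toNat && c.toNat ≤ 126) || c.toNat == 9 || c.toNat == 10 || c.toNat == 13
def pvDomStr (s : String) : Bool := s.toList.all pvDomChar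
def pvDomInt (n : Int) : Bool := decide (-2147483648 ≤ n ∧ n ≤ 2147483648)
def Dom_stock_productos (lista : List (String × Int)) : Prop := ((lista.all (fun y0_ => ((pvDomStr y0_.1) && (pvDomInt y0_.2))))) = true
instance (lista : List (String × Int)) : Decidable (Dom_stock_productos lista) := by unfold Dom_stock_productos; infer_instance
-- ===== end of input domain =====

-- B replaces A's full rescan of the list for every new name (nested loops) by one
-- grouping pass (name -> list of values) plus one reduce pass (min/max of each group).

-- ===== PORT A =====
-- A's inner loop body: scan one pair, update (minimo, maximo) when the name matches
def pvMinMaxStep (nombre : String) (mm : Int × Int) (q : String × Int) : Int × Int :=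
  if nombre == q.1 then
    let maximo : Int := if q.2 > mm.2 then q.2 else mm.2
    let minimo : Int := if q.2 < mm.1 then q.2 else mm.1
    (minimo, maximo)
  else mm

def stock_productos (lista : List (String × Int)) : List (String × Int × Int) :=
  (lista.foldl
    (fun (res : PySem.Dict String (Int × Int)) p =>
      if res.contains p.1 then res
      else res.insert p.1 (lista.foldl (pvMinMaxStep p.1) (p.2, p.2)))
    PySem.Dict.empty).items

-- ===== PORT B =====
-- min(vals) / max(vals); the groups' value lists are never empty, so the default 0 is never the result
def pvMinList (vals : List Int) : Int := (PySem.List.min? vals (fun y => y)).getD 0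
def pvMaxList (vals : List Int) : Int := (PySem.List.max? vals (fun y => y)).getD 0

def stock_productos_alt (lista : List (String × Int)) : List (String × Int × Int) :=
  let groups : PySem.Dict String (List Int) :=
    lista.foldl (fun d p => d.modify p.1 [] (· ++ [p.2])) PySem.Dict.empty
  groups.items.map (fun pr => (pr.1, pvMinList pr.2, pvMaxList pr.2))

-- ===== PRECONDITION & SPEC =====
def Spec_stock_productos (lista : List (String × Int)) (out : List (String × Int × Int)) : Prop := out = stock_productos_alt lista
instance (lista : List (String × Int)) (out : List (String × Int × Int)) : Decidable (Spec_stock_productos lista out) := by unfold Spec_stock_productos; infer_instance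

-- ===== CLAIM (what is proved, stated in full; the proofs are below) =====
def Claim_equal_stock_productos : Prop := ∀ (lista : List (String × Int)), Dom_stock_productos lista → Spec_stock_productos lista (stock_productos lista)

-- ===== LEMMAS AND PROOFS =====

-- all values observed for name n, in list order
def pvVals (n : String) (l : List (String × Int)) : List Int :=
  (l.filter (fun p => p.1 == n)).map (·.2)

theorem pvVals_cons (n : String) (a : String × Int) (l : List (String × Int)) :
    pvVals n (a :: l) = if a.1 = n then a.2 :: pvVals n l else pvVals n l := by
  simp only [pvVals, List.filter_cons]
  split <;> simp_all

theorem pvMinMaxStep_eq_of (n : String) (mm : Int × Int) (a : String × Int) (h : a.1 = n) :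
    pvMinMaxStep n mm a = (min mm.1 a.2, max mm.2 a.2) := by
  subst h
  simp only [pvMinMaxStep, beq_self_eq_true, if_true]
  have h1 : (if a.2 < mm.1 then a.2 else mm.1) = min mm.1 a.2 := by rw [min_def]; split_ifs <;> omega
  have h2 : (if a.2 > mm.2 then a.2 else mm.2) = max mm.2 a.2 := by rw [max_def]; split_ifs <;> omega
  rw [h1, h2]

theorem pvMinMaxStep_eq_of_ne (n : String) (mm : Int × Int) (a : String × Int) (h : ¬ a.1 = n) :
    pvMinMaxStep n mm a = mm := by
  have hb : (n == a.1) = false := by simp; exact fun h' => h h'.symm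
  simp [pvMinMaxStep, hb]

-- A's inner scan of the whole list is the (min, max) fold over the values of that name
theorem foldl_minMaxStep (n : String) (L : List (String × Int)) :
    ∀ mm : Int × Int, L.foldl (pvMinMaxStep n) mm
      = (pvVals n L).foldl (fun mm v => (min mm.1 v, max mm.2 v)) mm := by
  induction L with
  | nil => intro mm; simp [pvVals]
  | cons a L' ih =>
    intro mm
    rw [List.foldl_cons, ih, pvVals_cons]
    by_cases h : a.1 = n
    · rw [if_pos h, List.foldl_cons, pvMinMaxStep_eq_of n mm a h]
    · rw [if_neg h, pvMinMaxStep_eq_of_ne n mm a h]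

-- absorbing an element already in the list leaves a running min/max unchanged
theorem foldl_min_absorb (t : List Int) (v : Int) (hv : v ∈ t) :
    ∀ a : Int, t.foldl min (min v a) = t.foldl min a := by
  induction t with
  | nil => cases hv
  | cons x t' ih =>
    intro a
    rcases List.mem_cons.mp hv with h | h
    · subst h
      simp only [List.foldl_cons]
      congr 1
      simp [min_def]; split_ifs <;> omega
    · simp only [List.foldl_cons]
      rw [show min (min v a) x = min v (min a x) from (min_assoc v a x)]
      exact ih h (min a x)

theorem foldl_max_absorb (t : List Int) (v : Int) (hv : v ∈ t) :
    ∀ a : Int, t.foldl max (max v a) = t.foldl max a := by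
  induction t with
  | nil => cases hv
  | cons x t' ih =>
    intro a
    rcases List.mem_cons.mp hv with h | h
    · subst h
      simp only [List.foldl_cons]
      congr 1
      simp [max_def]; split_ifs <;> omega
    · simp only [List.foldl_cons]
      rw [show max (max v a) x = max v (max a x) from (max_assoc v a x)]
      exact ih h (max a x)

-- a running min/max seeded with a member of the list is min(vals) / max(vals)
theorem pvMinList_seed (vals : List Int) (v : Int) (hv : v ∈ vals) :
    vals.foldl min v = pvMinList vals := by
  cases vals with
  | nil => cases hv
  | cons w t =>
    rw [pvMinList, PySem.List.min?_id_cons, Option.getD_some, List.foldl_cons]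
    rcases List.mem_cons.mp hv with h | h
    · subst h; rw [min_self]
    · exact foldl_min_absorb t v h w

theorem pvMaxList_seed (vals : List Int) (v : Int) (hv : v ∈ vals) :
    vals.foldl max v = pvMaxList vals := by
  cases vals with
  | nil => cases hv
  | cons w t =>
    rw [pvMaxList, PySem.List.max?_id_cons, Option.getD_some, List.foldl_cons]
    rcases List.mem_cons.mp hv with h | h
    · subst h; rw [max_self]
    · exact foldl_max_absorb t v h w

-- A's inner scan, seeded with an occurrence of the name, yields (min, max) of that name's values
theorem inner_eq (L : List (String × Int)) (q : String × Int) (hq : q ∈ L) :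
    L.foldl (pvMinMaxStep q.1) (q.2, q.2)
      = (pvMinList (pvVals q.1 L), pvMaxList (pvVals q.1 L)) := by
  have hv : q.2 ∈ pvVals q.1 L := by
    simp only [pvVals, List.mem_map]
    exact ⟨q, List.mem_filter.mpr ⟨hq, by simp⟩, rfl⟩
  rw [foldl_minMaxStep,
    PySem.List.foldl_prod_mk (f := fun a v => min a v) (g := fun b v => max b v),
    pvMinList_seed _ _ hv, pvMaxList_seed _ _ hv]

-- items of a Nodup-keyed dict are its keys paired with their getD values
theorem items_eq_keys_map {κ ν : Type} [BEq κ] [LawfulBEq κ]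
    (d : PySem.Dict κ ν) (h : d.keys.Nodup) (d0 : ν) :
    d.items = d.keys.map (fun k => (k, d.getD k d0)) := by
  conv_lhs => rw [← List.map_id d.items]
  simp only [PySem.Dict.keys, List.map_map]
  apply List.map_congr_left
  intro p hp
  obtain ⟨k, v⟩ := p
  simp only [id, Function.comp]
  rw [PySem.Dict.getD_of_mem_items (h := hp) (hnd := h)]

-- A's fold characterized: first-occurrence names, each mapped to (min, max) over L
theorem A_inv (L : List (String × Int)) (p : List (String × Int)) (hp : ∀ q ∈ p, q ∈ L) :
    (p.foldl
      (fun (res : PySem.Dict String (Int × Int)) q =>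
        if res.contains q.1 then res
        else res.insert q.1 (L.foldl (pvMinMaxStep q.1) (q.2, q.2)))
      PySem.Dict.empty).items
    = (PySem.Set.ofList (p.map (·.1))).map
        (fun n => (n, pvMinList (pvVals n L), pvMaxList (pvVals n L))) := by
  induction p using List.reverseRecOn with
  | nil => rfl
  | append_singleton p q ih =>
    have hp' : ∀ r ∈ p, r ∈ L := fun r hr => hp r (List.mem_append_left _ hr)
    have hq : q ∈ L := hp q (List.mem_append_right _ (List.mem_singleton_self q))
    have ihp := ih hp'
    rw [List.foldl_append, List.foldl_cons, List.foldl_nil]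
    have hkeys : (p.foldl
        (fun (res : PySem.Dict String (Int × Int)) q =>
          if res.contains q.1 then res
          else res.insert q.1 (L.foldl (pvMinMaxStep q.1) (q.2, q.2)))
        PySem.Dict.empty).keys = PySem.Set.ofList (p.map (·.1)) := by
      show (_ : PySem.Dict String (Int × Int)).items.map (·.1) = _
      rw [ihp, List.map_map]
      exact List.map_id' _
    have hcont : (p.foldl
        (fun (res : PySem.Dict String (Int × Int)) q =>
          if res.contains q.1 then res
          else res.insert q.1 (L.foldl (pvMinMaxStep q.1) (q.2, q.2)))
        PySem.Dict.empty).contains q.1 = decide (q.1 ∈ p.map (·.1)) := by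
      rw [PySem.Dict.contains_eq_decide_mem_keys, hkeys]
      simp [PySem.Set.mem_ofList]
    by_cases hmem : q.1 ∈ p.map (·.1)
    · rw [hcont, decide_eq_true hmem, if_pos rfl, ihp]
      simp only [List.map_append, List.map_cons, List.map_nil]
      rw [PySem.Set.ofList_append_singleton,
        PySem.Set.add_of_mem (by rw [PySem.Set.mem_ofList]; exact hmem)]
    · rw [hcont, decide_eq_false hmem, if_neg (by simp)]
      have hc : (p.foldl
          (fun (res : PySem.Dict String (Int × Int)) q =>
            if res.contains q.1 then res
            else res.insert q.1 (L.foldl (pvMinMaxStep q.1) (q.2, q.2)))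
          PySem.Dict.empty).contains q.1 = false := by rw [hcont, decide_eq_false hmem]
      rw [PySem.Dict.items_insert_of_not_contains _ _ hc, ihp]
      simp only [List.map_append, List.map_cons, List.map_nil]
      rw [PySem.Set.ofList_append_singleton,
        PySem.Set.add_of_not_mem (by rw [PySem.Set.mem_ofList]; exact hmem),
        List.map_append, inner_eq L q hq]
      rfl

-- B characterized: the same first-occurrence names, each mapped to (min, max) of its group
theorem B_eq (l : List (String × Int)) :
    stock_productos_alt l
    = (PySem.Set.ofList (l.map (·.1))).map
        (fun n => (n, pvMinList (pvVals n l), pvMaxList (pvVals n l))) := by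
  show (l.foldl (fun d p => d.modify p.1 [] (· ++ [p.2])) (PySem.Dict.empty : PySem.Dict String (List Int))).items.map
      (fun pr => (pr.1, pvMinList pr.2, pvMaxList pr.2)) = _
  have hkeys : (l.foldl (fun d p => d.modify p.1 [] (· ++ [p.2])) (PySem.Dict.empty : PySem.Dict String (List Int))).keys
      = PySem.Set.ofList (l.map (·.1)) := by
    rw [PySem.Dict.keys_foldl_modify_key (l := l) (key := fun p => p.1) (d0 := [])
        (f := fun _ p => (· ++ [p.2])) (d := PySem.Dict.empty),
      PySem.Dict.keys_empty, PySem.Set.update_nil_left]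
  have hnd : (l.foldl (fun d p => d.modify p.1 [] (· ++ [p.2])) (PySem.Dict.empty : PySem.Dict String (List Int))).keys.Nodup := by
    apply PySem.Dict.nodup_keys_foldl_modify_key
    rw [PySem.Dict.keys_empty]; exact List.nodup_nil
  rw [items_eq_keys_map _ hnd [], hkeys, List.map_map]
  apply List.map_congr_left
  intro n hn
  simp only [Function.comp]
  rw [PySem.Dict.getD_foldl_modify_append, PySem.Dict.getD_empty]
  rfl

-- ===== VERDICT (by name: the statement is the Claim_ definition above) =====
theorem stock_productos_spec : Claim_equal_stock_productos := by
  intro lista _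
  unfold Spec_stock_productos
  rw [B_eq, stock_productos, A_inv lista lista (fun q hq => hq)]
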